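-- pv_equiv track=rewrite | github.com/RESMP-DEV/metal-marlin | metal_marlin/calibration/calibration_dataset.py | _parse_v3_text
-- ===== SOURCE A (Python) =====
-- def _parse_v3_text(text: str, min_length: int) -> list[str]:
--     """Parse v3 format: blank-line separated paragraphs.
--
--     Consecutive non-blank lines are joined into samples.
--     """
--     samples = []
--     current: list[str] = []
--
--     for line in text.split("\n"):
--         stripped = line.strip()
--         if not stripped:
--             # Blank line: end of sample
--             if current:
--                 sample = "\n".join(current)
--                 if len(sample) >= min_length:
--                     samples.append(sample)
--                 current = []
--         else:
--             current.append(line)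
--
--     # Handle last sample without trailing blank
--     if current:
--         sample = "\n".join(current)
--         if len(sample) >= min_length:
--             samples.append(sample)
--
--     return samples
-- ===== SOURCE B (Python) =====
-- def _parse_v3_text(text: str, min_length: int) -> list[str]:
--     """Two-pointer run scanner: skip blank lines, grab each maximal run of
--     non-blank lines in one inner scan, join and length-filter it."""
--     lines = text.split("\n")
--     out = []
--     i, n = 0, len(lines)
--     while i < n:
--         if not lines[i].strip():
--             i += 1
--             continue
--         j = i + 1
--         while j < n and lines[j].strip():
--             j += 1
--         sample = "\n".join(lines[i:j])
--         if len(sample) >= min_length: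
--             out.append(sample)
--         i = j
--     return out
-- ===== Notes on version B (the rewrite author's own statement) =====
-- stated objective: alternative
-- what changed: Replaced A's single fold with a mutable `current` accumulator and a duplicated end-of-text flush by a two-pointer run scanner that skips blank lines and slices each maximal non-blank run out in one inner scan, with no pending state and no flush block.
import Mathlib
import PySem

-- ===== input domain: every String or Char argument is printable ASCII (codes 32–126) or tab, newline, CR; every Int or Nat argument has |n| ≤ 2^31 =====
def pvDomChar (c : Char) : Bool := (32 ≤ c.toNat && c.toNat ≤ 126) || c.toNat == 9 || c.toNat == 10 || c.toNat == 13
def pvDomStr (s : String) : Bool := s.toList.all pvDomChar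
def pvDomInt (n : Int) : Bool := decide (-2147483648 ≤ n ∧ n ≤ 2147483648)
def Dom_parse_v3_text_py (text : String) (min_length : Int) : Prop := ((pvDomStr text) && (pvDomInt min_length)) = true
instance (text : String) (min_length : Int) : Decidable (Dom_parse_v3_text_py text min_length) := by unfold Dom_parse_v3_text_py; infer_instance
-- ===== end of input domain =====

-- B replaces A's fold-with-pending-accumulator (and its duplicated end-of-text flush) by a
-- two-pointer run scanner over the split lines; same return value, objective: alternative.


-- ===== PORT A =====
-- one step of A's for-loop over the split lines; state = (samples, current)
def pvStepA (min_length : Int) (st : List String × List String) (line : String) :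
    List String × List String :=
  if PySem.Str.strip line = "" then
    if st.2 ≠ [] then
      let sample := PySem.Str.join "\n" st.2
      (if min_length ≤ (PySem.Str.len sample : Int) then st.1 ++ [sample] else st.1, [])
    else st
  else (st.1, st.2 ++ [line])

-- A's trailing "handle last sample without trailing blank" block
def pvFlushA (min_length : Int) (st : List String × List String) : List String :=
  if st.2 ≠ [] then
    let sample := PySem.Str.join "\n" st.2
    if min_length ≤ (PySem.Str.len sample : Int) then st.1 ++ [sample] else st.1
  else st.1

def parse_v3_text_py (text : String) (min_length : Int) : List String :=
  pvFlushA min_length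
    (((PySem.Str.split? text "\n").getD []).foldl (pvStepA min_length) ([], []))

-- ===== PORT B =====
-- B's two-pointer scan: skip a blank line; at a non-blank line take the whole maximal
-- non-blank run (B's inner scan with index j), emit it if long enough, resume after the run.
def pvScanB (min_length : Int) : List String → List String
  | [] => []
  | l :: ls =>
    if PySem.Str.strip l = "" then pvScanB min_length ls
    else
      let run := l :: ls.takeWhile (fun x => PySem.Str.strip x ≠ "")
      let rest := ls.dropWhile (fun x => PySem.Str.strip x ≠ "")
      let sample := PySem.Str.join "\n" run
      (if min_length ≤ (PySem.Str.len sample : Int) then [sample] else []) ++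
        pvScanB min_length rest
  termination_by ls => ls.length
  decreasing_by
    · simp
    · simp only [List.length_cons]
      have h2 := List.length_dropWhile_le (fun x => decide (PySem.Str.strip x ≠ "")) ls
      omega

def parse_v3_text_py_alt (text : String) (min_length : Int) : List String :=
  pvScanB min_length ((PySem.Str.split? text "\n").getD [])

-- ===== PRECONDITION & SPEC =====
def Spec_parse_v3_text_py (text : String) (min_length : Int) (out : List String) : Prop := out = parse_v3_text_py_alt text min_length
instance (text : String) (min_length : Int) (out : List String) : Decidable (Spec_parse_v3_text_py text min_length out) := by unfold Spec_parse_v3_text_py; infer_instance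

-- ===== CLAIM (what is proved, stated in full; the proofs are below) =====
def Claim_equal_parse_v3_text_py : Prop := ∀ (text : String) (min_length : Int), Dom_parse_v3_text_py text min_length → Spec_parse_v3_text_py text min_length (parse_v3_text_py text min_length)

-- ===== LEMMAS AND PROOFS =====

-- what A emits for a finished paragraph `cur` (empty cur emits nothing)
def pvEmit (min_length : Int) (cur : List String) : List String :=
  if cur ≠ [] then
    if min_length ≤ (PySem.Str.len (PySem.Str.join "\n" cur) : Int) then
      [PySem.Str.join "\n" cur]
    else []
  else []

lemma pvStepA_samples (ml : Int) (s c : List String) (l : String) :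
    pvStepA ml (s, c) l = (s ++ (pvStepA ml ([], c) l).1, (pvStepA ml ([], c) l).2) := by
  simp only [pvStepA]
  split_ifs <;> simp

lemma pvFoldA_samples (ml : Int) (ls : List String) (s c : List String) :
    ls.foldl (pvStepA ml) (s, c) =
      (s ++ (ls.foldl (pvStepA ml) ([], c)).1, (ls.foldl (pvStepA ml) ([], c)).2) := by
  induction ls generalizing s c with
  | nil => simp
  | cons l ls ih =>
    simp only [List.foldl_cons]
    rw [pvStepA_samples, ih, ih ((pvStepA ml ([], c) l).1)]
    simp

lemma pvFlushA_samples (ml : Int) (s c : List String) :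
    pvFlushA ml (s, c) = s ++ pvFlushA ml ([], c) := by
  simp only [pvFlushA]
  split_ifs <;> simp

-- the step of A at a blank line flushes `cur` as pvEmit
lemma pvStepA_blank (ml : Int) (cur : List String) (l : String)
    (h : PySem.Str.strip l = "") : pvStepA ml ([], cur) l = (pvEmit ml cur, []) := by
  simp only [pvStepA, pvEmit, h, if_true]
  split_ifs <;> simp_all

-- pvScanB absorbs a leading maximal non-blank run
lemma pvScanB_eq (ml : Int) (ls : List String) :
    pvScanB ml ls =
      pvEmit ml (ls.takeWhile (fun x => PySem.Str.strip x ≠ "")) ++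
        pvScanB ml (ls.dropWhile (fun x => PySem.Str.strip x ≠ "")) := by
  cases ls with
  | nil => simp [pvScanB, pvEmit]
  | cons l ls =>
    by_cases h : PySem.Str.strip l = ""
    · simp [pvScanB, pvEmit, h]
    · conv_lhs => unfold pvScanB
      simp [pvEmit, h]

-- the main invariant: flushing A's fold run from pending paragraph `cur` equals
-- emitting `cur` extended by the leading non-blank run, then B's scan of the rest
lemma pvMain (ml : Int) (ls : List String) (cur : List String) :
    pvFlushA ml (ls.foldl (pvStepA ml) ([], cur)) =
      pvEmit ml (cur ++ ls.takeWhile (fun x => PySem.Str.strip x ≠ "")) ++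
        pvScanB ml (ls.dropWhile (fun x => PySem.Str.strip x ≠ "")) := by
  induction ls generalizing cur with
  | nil =>
    simp only [List.foldl_nil, List.takeWhile_nil, List.dropWhile_nil]
    rw [show pvScanB ml [] = [] from by unfold pvScanB; rfl]
    simp only [List.append_nil, pvFlushA, pvEmit]
    split_ifs <;> simp_all
  | cons l ls ih =>
    by_cases h : PySem.Str.strip l = ""
    · simp only [List.foldl_cons, List.takeWhile_cons, List.dropWhile_cons, h,
        ne_eq, not_true_eq_false, decide_false, Bool.false_eq_true, if_false,
        List.append_nil]
      rw [pvStepA_blank ml cur l h, pvFoldA_samples, pvFlushA_samples,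
        List.append_assoc, ← pvFlushA_samples, Prod.mk.eta, ih []]
      have hscan : pvScanB ml (l :: ls) = pvScanB ml ls := by
        conv_lhs => unfold pvScanB
        simp [h]
      conv_rhs => rw [hscan, pvScanB_eq ml ls]
      simp
    · simp only [List.foldl_cons, List.takeWhile_cons, List.dropWhile_cons, h,
        ne_eq, not_false_eq_true, decide_true, if_true]
      have hstep : pvStepA ml ([], cur) l = ([], cur ++ [l]) := by
        simp [pvStepA, h]
      rw [hstep, ih (cur ++ [l])]
      simp

-- ===== VERDICT (by name: the statement is the Claim_ definition above) =====
theorem parse_v3_text_py_spec : Claim_equal_parse_v3_text_py := by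
  intro text ml _
  unfold Spec_parse_v3_text_py parse_v3_text_py parse_v3_text_py_alt
  rw [pvMain, List.nil_append, ← pvScanB_eq]
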